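-- pv_equiv track=rewrite | github.com/asifahmed0021/Bayesian-inference | main.py | util
-- ===== SOURCE A (Python) =====
-- def get_row(network,col_index):
--     temp=[]
--     for i in range(len(network)):
--         if(network[i][col_index]=='0'):
--             continue
--         else:
--             temp.append(i)
--     return temp
--
-- def util(network,col_index,param_list):
--     #indicies of all rows on which current variable is dependent
--     row_index_list=get_row(network,col_index)
--     #variables of only current parameter and its dependent parameters
--     sub_param=[]
--     #adding current parameter variables to list
--     sub_param.append(param_list[col_index])
--     for i in row_index_list:
--         sub_param.append(param_list[i])
--     #adding current parameter index to list
--     row_index_list.insert(0,col_index)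
--
--     return row_index_list,sub_param
--
-- param_list=[]
--
-- network=[]
-- ===== SOURCE B (Python) =====
-- def util(network, col_index, param_list):
--     # One recursive pass over the rows, accumulating both result lists in
--     # lockstep (indices and parameters as a pair), built back-to-front as the
--     # recursion unwinds; the current column's entry heads both lists.
--     def go(rows, i):
--         if not rows:
--             return [], []
--         idxs, params = go(rows[1:], i + 1)
--         if rows[0][col_index] != '0':
--             return [i] + idxs, [param_list[i]] + params
--         return idxs, params
--     idxs, params = go(network, 0)
--     return [col_index] + idxs, [param_list[col_index]] + params
-- ===== Notes on version B (the rewrite author's own statement) =====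
-- stated objective: alternative
-- what changed: Replaces A's staged passes (index-scan helper, then a separate parameter-accumulating loop, then an in-place insert) with a single structural recursion over the rows that builds the index list and the parameter list together as a pair while unwinding, prepending the current column's entries at the end.
import Mathlib
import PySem

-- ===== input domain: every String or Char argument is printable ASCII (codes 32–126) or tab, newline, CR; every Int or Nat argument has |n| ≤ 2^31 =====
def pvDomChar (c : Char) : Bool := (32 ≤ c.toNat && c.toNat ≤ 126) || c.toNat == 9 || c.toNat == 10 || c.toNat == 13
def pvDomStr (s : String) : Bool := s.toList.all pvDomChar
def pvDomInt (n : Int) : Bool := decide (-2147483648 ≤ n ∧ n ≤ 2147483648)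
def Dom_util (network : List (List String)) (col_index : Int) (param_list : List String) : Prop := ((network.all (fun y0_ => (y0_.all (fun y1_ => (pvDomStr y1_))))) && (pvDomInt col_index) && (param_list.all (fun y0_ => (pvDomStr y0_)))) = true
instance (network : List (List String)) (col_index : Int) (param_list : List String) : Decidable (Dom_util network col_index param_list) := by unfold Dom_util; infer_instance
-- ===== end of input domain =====

-- B replaces A's staged passes (index-scan helper, parameter loop, in-place insert) with one
-- structural recursion over the rows accumulating the index list and parameter list as a pair.

-- ===== PORT A =====
-- get_row: scan i over range(len(network)), skip rows whose col_index entry is '0'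
def get_rowPort (network : List (List String)) (col_index : Int) : List Int :=
  (PySem.List.pyRange 0 (network.length : Int) 1).foldl
    (fun temp i =>
      if PySem.List.pyGetD (PySem.List.pyGetD network i []) col_index "" == "0" then temp
      else temp ++ [i]) []

def util (network : List (List String)) (col_index : Int) (param_list : List String) : List Int × List String :=
  let row_index_list := get_rowPort network col_index
  let sub_param : List String := [PySem.List.pyGetD param_list col_index ""]
  let sub_param := row_index_list.foldl
    (fun acc i => acc ++ [PySem.List.pyGetD param_list i ""]) sub_param
  (PySem.List.insert row_index_list 0 col_index, sub_param)

-- ===== PORT B =====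
-- go(rows, i): recursion over the remaining rows, pairing index and parameter accumulation
def goAlt (col_index : Int) (param_list : List String) :
    List (List String) → Int → List Int × List String
  | [], _ => ([], [])
  | r :: rs, i =>
    let rest := goAlt col_index param_list rs (i + 1)
    if PySem.List.pyGetD r col_index "" ≠ "0" then
      (i :: rest.1, PySem.List.pyGetD param_list i "" :: rest.2)
    else rest

def util_alt (network : List (List String)) (col_index : Int) (param_list : List String) : List Int × List String :=
  let p := goAlt col_index param_list network 0
  (col_index :: p.1, PySem.List.pyGetD param_list col_index "" :: p.2)

-- ===== PRECONDITION & SPEC =====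
-- Pre_util: exactly the inputs where the Python raises no IndexError: col_index is a valid
-- (possibly negative) index into param_list and into every row of network, and every selected
-- row index is a valid index into param_list.
def Pre_util (network : List (List String)) (col_index : Int) (param_list : List String) : Prop :=
  PySem.Raise.InRange param_list.length col_index ∧
  ∀ i < network.length,
    PySem.Raise.InRange (network.getD i []).length col_index ∧
    (PySem.List.pyGetD (network.getD i []) col_index "" ≠ "0" → i < param_list.length)
instance (network : List (List String)) (col_index : Int) (param_list : List String) : Decidable (Pre_util network col_index param_list) := by unfold Pre_util; infer_instance

def pvWitness_util : List (List String) × Int × List String :=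
  ([["1"], ["0"]], 0, ["a", "b"])

def Spec_util (network : List (List String)) (col_index : Int) (param_list : List String) (out : List Int × List String) : Prop := out = util_alt network col_index param_list
instance (network : List (List String)) (col_index : Int) (param_list : List String) (out : List Int × List String) : Decidable (Spec_util network col_index param_list out) := by unfold Spec_util; infer_instance

-- ===== CLAIM =====
def Claim_equal_util : Prop := ∀ (network : List (List String)) (col_index : Int) (param_list : List String), Dom_util network col_index param_list → Pre_util network col_index param_list → Spec_util network col_index param_list (util network col_index param_list)

-- ===== LEMMAS AND PROOFS =====

-- B's paired recursion: the parameter component is the map of the index component.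
theorem goAlt_snd (col_index : Int) (param_list : List String) (rs : List (List String)) (i : Int) :
    (goAlt col_index param_list rs i).2
      = (goAlt col_index param_list rs i).1.map (fun j => PySem.List.pyGetD param_list j "") := by
  induction rs generalizing i with
  | nil => simp [goAlt]
  | cons r rs ih =>
    simp only [goAlt]
    split_ifs with h <;> simp [ih]

-- A's append-accumulating fold over the enumerated rows extends the accumulator by
-- exactly B's recursively built index list.
theorem foldl_enumerate_eq_goAlt (col_index : Int) (param_list : List String)
    (rs : List (List String)) (i : Int) (acc : List Int) :
    (PySem.List.enumerate rs i).foldl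
        (fun temp p => if PySem.List.pyGetD p.2 col_index "" = "0" then temp else temp ++ [p.1]) acc
      = acc ++ (goAlt col_index param_list rs i).1 := by
  induction rs generalizing i acc with
  | nil => simp [PySem.List.enumerate_nil, goAlt]
  | cons r rs ih =>
    rw [PySem.List.enumerate_cons]
    simp only [List.foldl_cons, goAlt]
    by_cases h : PySem.List.pyGetD r col_index "" = "0"
    · simp [h, ih]
    · simp [h, ih]

-- A's index list is col_index consed onto B's recursive index list.
theorem get_rowPort_eq (network : List (List String)) (col_index : Int) (param_list : List String) :
    get_rowPort network col_index = (goAlt col_index param_list network 0).1 := by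
  unfold get_rowPort
  have he : PySem.List.enumerate network 0
      = (PySem.List.pyRange 0 (network.length : Int) 1).map
          (fun j => (j, PySem.List.pyGetD network j [])) := by
    simpa using PySem.List.enumerate_eq_map_pyRange network []
  have hm : (PySem.List.pyRange 0 (network.length : Int) 1).foldl
      (fun temp i =>
        if PySem.List.pyGetD (PySem.List.pyGetD network i []) col_index "" = "0" then temp
        else temp ++ [i]) []
    = (PySem.List.enumerate network 0).foldl
        (fun temp p => if PySem.List.pyGetD p.2 col_index "" = "0" then temp else temp ++ [p.1]) [] := by
    rw [he, List.foldl_map]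
  simp only [beq_iff_eq]
  rw [hm]
  simpa using foldl_enumerate_eq_goAlt col_index param_list network 0 []

theorem util_eq_alt (network : List (List String)) (col_index : Int) (param_list : List String) :
    util network col_index param_list = util_alt network col_index param_list := by
  unfold util util_alt
  simp only [PySem.List.foldl_append_singleton_eq_map, PySem.List.insert_zero,
    get_rowPort_eq network col_index param_list, goAlt_snd]
  simp

-- ===== VERDICT =====
theorem util_spec : Claim_equal_util := by
  intro network col_index param_list _ _
  exact util_eq_alt network col_index param_list
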